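-- pv_equiv track=rewrite | github.com/QI1002/exampool | Leetcode/327.py | countRangeSum2
-- ===== SOURCE A (Python) =====
-- def countRangeAdd(t, result, upper, lower):
--     if (t[2] >= lower and t[2] <= upper):
--         result.append(t)
--
-- def countRangeSum2(data, upper, lower):
--     count = len(data)
--     result = []
--     for i in range(count):
--         for j in range(i, count, 1):
--             s = 0
--             for k in range(i, j+1, 1):
--                 s += data[k]
--             countRangeAdd((i,j,s), result, upper, lower)
--
--     return sorted(result)
-- ===== SOURCE B (Python) =====
-- def countRangeSum2(data, upper, lower):
--     n = len(data)
--     prefix = [0]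
--     for x in data:
--         prefix.append(prefix[-1] + x)
--     out = []
--     for i in range(n):
--         pi = prefix[i]
--         for j in range(i, n):
--             s = prefix[j + 1] - pi
--             if lower <= s <= upper:
--                 out.append((i, j, s))
--     return out
-- ===== Notes on version B (the rewrite author's own statement) =====
-- stated objective: faster
-- what changed: B precomputes prefix sums so each subarray sum is an O(1) difference instead of an O(n) inner loop, and emits the tuples directly in (i,j) order, dropping the final sort since that order is already the sorted order.
import Mathlib
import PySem

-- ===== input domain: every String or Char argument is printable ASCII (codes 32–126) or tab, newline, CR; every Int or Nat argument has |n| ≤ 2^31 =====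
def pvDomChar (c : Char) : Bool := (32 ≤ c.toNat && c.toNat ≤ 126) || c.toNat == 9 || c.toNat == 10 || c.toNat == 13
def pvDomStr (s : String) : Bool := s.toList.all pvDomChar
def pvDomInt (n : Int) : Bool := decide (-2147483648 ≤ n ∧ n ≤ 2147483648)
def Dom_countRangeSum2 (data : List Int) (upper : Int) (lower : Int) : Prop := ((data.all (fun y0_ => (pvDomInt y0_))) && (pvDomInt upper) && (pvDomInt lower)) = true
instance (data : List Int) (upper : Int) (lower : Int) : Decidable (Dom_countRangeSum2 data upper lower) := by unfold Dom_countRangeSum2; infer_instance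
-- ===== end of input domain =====

-- B replaces A's O(n) inner summation loop by precomputed prefix sums (O(1) per subarray) and emits
-- the tuples directly in (i,j) order, dropping the final sort since that order is already sorted.


-- ===== PORT A =====
def countRangeAdd (t : Int × Int × Int) (result : List (Int × Int × Int)) (upper : Int) (lower : Int) : List (Int × Int × Int) :=
  if t.2.2 ≥ lower ∧ t.2.2 ≤ upper then result ++ [t] else result

-- Python's sorted on triples compares lexicographically; PySem.List.sorted/sorted2 take scalar/pair
-- keys only, so the strict lexicographic 'before' test on triples is written out by hand; the stable
-- insertion fold below is exactly PySem's sorted (cf. PySem.List.sorted_eq_foldl_insertBy), hence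
-- exact for Python's stable sort.
def lex3lt (a b : Int × Int × Int) : Bool :=
  decide (a.1 < b.1) || (decide (a.1 = b.1) && (decide (a.2.1 < b.2.1) || (decide (a.2.1 = b.2.1) && decide (a.2.2 < b.2.2))))

def pySorted3 (xs : List (Int × Int × Int)) : List (Int × Int × Int) :=
  xs.foldl (fun acc x => PySem.List.insertBy lex3lt x acc) []

def countRangeSum2 (data : List Int) (upper : Int) (lower : Int) : List (Int × Int × Int) :=
  let count : Int := data.length
  let result := (PySem.List.pyRange 0 count 1).foldl (fun result i =>
    (PySem.List.pyRange i count 1).foldl (fun result j =>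
      -- data[k]: k is always in range here, so pyGetD with default 0 is exact
      let s := (PySem.List.pyRange i (j+1) 1).foldl (fun s k => s + PySem.List.pyGetD data k 0) 0
      countRangeAdd (i, j, s) result upper lower) result) []
  pySorted3 result

-- ===== PORT B =====
def countRangeSum2_alt (data : List Int) (upper : Int) (lower : Int) : List (Int × Int × Int) :=
  let n : Int := data.length
  -- prefix[-1] on the always-nonempty list, and prefix[i]/prefix[j+1] with indices always in
  -- range: pyGetD is exact here
  let pre := data.foldl (fun pf x => pf ++ [PySem.List.pyGetD pf (-1) 0 + x]) [0]
  (PySem.List.pyRange 0 n 1).foldl (fun out i =>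
    let pi := PySem.List.pyGetD pre i 0
    (PySem.List.pyRange i n 1).foldl (fun out j =>
      let s := PySem.List.pyGetD pre (j+1) 0 - pi
      if lower ≤ s ∧ s ≤ upper then out ++ [(i, j, s)] else out) out) []

-- ===== PRECONDITION & SPEC =====
def Spec_countRangeSum2 (data : List Int) (upper : Int) (lower : Int) (out : List (Int × Int × Int)) : Prop := out = countRangeSum2_alt data upper lower
instance (data : List Int) (upper : Int) (lower : Int) (out : List (Int × Int × Int)) : Decidable (Spec_countRangeSum2 data upper lower out) := by unfold Spec_countRangeSum2; infer_instance

-- ===== CLAIM (what is proved, stated in full; the proofs are below) =====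
def Claim_equal_countRangeSum2 : Prop := ∀ (data : List Int) (upper : Int) (lower : Int), Dom_countRangeSum2 data upper lower → Spec_countRangeSum2 data upper lower (countRangeSum2 data upper lower)

-- ===== LEMMAS AND PROOFS =====

-- sum of data[0:k] (k an Int index, clamped by toNat; used only with 0 ≤ k)
def pvS (data : List Int) (k : Int) : Int := (data.take k.toNat).sum

-- the common closed form of both result lists
def pvBlocks (data : List Int) (upper lower : Int) : List (Int × Int × Int) :=
  (PySem.List.pyRange 0 data.length 1).flatMap (fun i =>
    ((PySem.List.pyRange i data.length 1).filter
        (fun j => decide (lower ≤ pvS data (j+1) - pvS data i ∧ pvS data (j+1) - pvS data i ≤ upper))).map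
      (fun j => (i, j, pvS data (j+1) - pvS data i)))

lemma pyGetD_append_neg_one (l : List Int) (a : Int) :
    PySem.List.pyGetD (l ++ [a]) (-1) 0 = a := by
  simp [PySem.List.pyGetD, PySem.List.pyGet?, PySem.List.pyIdx?]

lemma map_take_shift (a x : Int) (xs : List Int) :
    (List.range ((x :: xs).length + 1)).map (fun k => a + ((x :: xs).take k).sum)
      = a :: (List.range (xs.length + 1)).map (fun k => (a + x) + (xs.take k).sum) := by
  rw [show (x :: xs).length + 1 = (xs.length + 1) + 1 from rfl, List.range_succ_eq_map,
    List.map_cons, List.map_map]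
  simp only [List.take_zero, List.sum_nil, add_zero]
  congr 1
  refine List.map_congr_left (fun k _ => ?_)
  simp only [Function.comp_apply, Nat.succ_eq_add_one, List.take_succ_cons, List.sum_cons]
  ring

lemma prefix_build (xs : List Int) : ∀ (acc : List Int) (a : Int),
    xs.foldl (fun pf x => pf ++ [PySem.List.pyGetD pf (-1) 0 + x]) (acc ++ [a])
      = acc ++ (List.range (xs.length + 1)).map (fun k => a + (xs.take k).sum) := by
  induction xs with
  | nil => intro acc a; simp
  | cons x xs ih =>
    intro acc a
    rw [List.foldl_cons, pyGetD_append_neg_one, ih (acc ++ [a]) (a + x), map_take_shift,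
      List.append_assoc]
    simp

lemma sum_window (l : List Int) (a : Nat) : ∀ (m : Nat),
    ((List.range m).map (fun k => l.getD (a + k) 0)).sum = ((l.drop a).take m).sum := by
  intro m
  induction m with
  | zero => simp
  | succ m ih =>
    rw [List.range_succ, List.map_append, List.sum_append, ih, List.take_add_one, List.sum_append]
    simp only [List.map_cons, List.map_nil, List.sum_cons, List.sum_nil, add_zero,
      List.getD_eq_getElem?_getD, List.getElem?_drop]
    cases l[a + m]? <;> simp

lemma take_sub (l : List Int) (a b : Nat) (h : a ≤ b) :
    (l.take b).sum - (l.take a).sum = ((l.drop a).take (b - a)).sum := by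
  have hb : b = a + (b - a) := by omega
  calc (l.take b).sum - (l.take a).sum
      = (l.take (a + (b - a))).sum - (l.take a).sum := by rw [← hb]
    _ = ((l.drop a).take (b - a)).sum := by rw [List.take_add, List.sum_append]; ring

lemma lex3lt_asymm (x y : Int × Int × Int) (h : lex3lt x y = true) : lex3lt y x = false := by
  simp only [lex3lt, Bool.or_eq_true, Bool.and_eq_true, decide_eq_true_eq] at h ⊢
  simp only [Bool.or_eq_false_iff, Bool.and_eq_false_iff, decide_eq_false_iff_not, not_lt]
  omega

lemma foldl_insertBy_pairwise (xs : List (Int × Int × Int))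
    (h2 : xs.Pairwise (fun a b => lex3lt a b = true)) : ∀ (acc : List (Int × Int × Int)),
    (∀ y ∈ acc, ∀ x ∈ xs, lex3lt y x = true) →
    xs.foldl (fun acc x => PySem.List.insertBy lex3lt x acc) acc = acc ++ xs := by
  induction xs with
  | nil => intro acc _; simp
  | cons x xs ih =>
    intro acc h1
    rw [List.pairwise_cons] at h2
    rw [List.foldl_cons, PySem.List.insertBy_of_forall_not_before]
    · rw [ih h2.2 (acc ++ [x]) ?_]
      · simp
      · intro y hy z hz
        rcases List.mem_append.1 hy with hy | hy
        · exact h1 y hy z (List.mem_cons_of_mem _ hz)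
        · simp only [List.mem_singleton] at hy; subst hy; exact h2.1 z hz
    · intro y hy
      exact lex3lt_asymm y x (h1 y hy x (List.mem_cons_self))

lemma pySorted3_of_pairwise (xs : List (Int × Int × Int))
    (h : xs.Pairwise (fun a b => lex3lt a b = true)) : pySorted3 xs = xs := by
  have := foldl_insertBy_pairwise xs h [] (by simp)
  simpa [pySorted3] using this

lemma blocks_pairwise (data : List Int) (upper lower : Int) :
    (pvBlocks data upper lower).Pairwise (fun a b => lex3lt a b = true) := by
  unfold pvBlocks
  rw [List.flatMap_def, List.pairwise_flatten]
  constructor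
  · intro l hl
    simp only [List.mem_map] at hl
    obtain ⟨i, _, rfl⟩ := hl
    exact ((PySem.List.pairwise_lt_pyRange_one i data.length).filter _).map _
      (fun a b hab => by simp [lex3lt, hab])
  · exact (PySem.List.pairwise_lt_pyRange_one 0 data.length).map _
      (fun i1 i2 h12 x hx y hy => by
        simp only [List.mem_map] at hx hy
        obtain ⟨j1, _, rfl⟩ := hx
        obtain ⟨j2, _, rfl⟩ := hy
        simp [lex3lt, h12])

lemma subsum_eq (data : List Int) (i j : Int) (h0 : 0 ≤ i) (hij : i ≤ j) (_hj : j < data.length) :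
    (PySem.List.pyRange i (j+1) 1).foldl (fun s k => s + PySem.List.pyGetD data k 0) 0
      = pvS data (j+1) - pvS data i := by
  rw [PySem.List.foldl_add, PySem.List.pyRange_one, List.map_map]
  have h1 : ∀ k : Nat, PySem.List.pyGetD data (i + (k : Int)) 0 = data.getD (i.toNat + k) 0 := by
    intro k
    rw [PySem.List.pyGetD_of_nonneg data 0 (by omega)]
    congr 1
    omega
  rw [List.map_congr_left (fun k _ => by
    simp only [Function.comp_apply]; exact h1 k), sum_window data i.toNat ((j + 1 - i).toNat)]
  have hm : (j + 1 - i).toNat = (j.toNat + 1) - i.toNat := by omega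
  have hj1 : (j + 1).toNat = j.toNat + 1 := by omega
  rw [hm, pvS, pvS, hj1, take_sub data i.toNat (j.toNat + 1) (by omega)]
  ring

lemma A_result_eq (data : List Int) (upper lower : Int) :
    (PySem.List.pyRange 0 (data.length : Int) 1).foldl (fun result i =>
      (PySem.List.pyRange i (data.length : Int) 1).foldl (fun result j =>
        let s := (PySem.List.pyRange i (j+1) 1).foldl (fun s k => s + PySem.List.pyGetD data k 0) 0
        countRangeAdd (i, j, s) result upper lower) result) []
      = pvBlocks data upper lower := by
  rw [PySem.List.foldl_congr_mem _ _
      (fun acc i => acc ++ ((PySem.List.pyRange i (data.length : Int) 1).filter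
          (fun j => decide (lower ≤ pvS data (j+1) - pvS data i ∧ pvS data (j+1) - pvS data i ≤ upper))).map
        (fun j => (i, j, pvS data (j+1) - pvS data i))) []
      (fun acc i hi => ?_), PySem.List.foldl_append_eq_flatMap]
  · simp [pvBlocks]
  · have hi' := (PySem.List.mem_pyRange_one).1 hi
    rw [PySem.List.foldl_congr_mem _ _
        (fun acc j => if lower ≤ pvS data (j+1) - pvS data i ∧ pvS data (j+1) - pvS data i ≤ upper
          then acc ++ [(i, j, pvS data (j+1) - pvS data i)] else acc) acc
        (fun acc2 j hj => ?_)]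
    · exact PySem.List.foldl_append_ite _ _ _ _
    · have hj' := (PySem.List.mem_pyRange_one).1 hj
      have hs := subsum_eq data i j hi'.1 hj'.1 hj'.2
      simp only [hs, countRangeAdd, ge_iff_le]

lemma B_result_eq (data : List Int) (upper lower : Int) :
    countRangeSum2_alt data upper lower = pvBlocks data upper lower := by
  unfold countRangeSum2_alt
  have hpre : data.foldl (fun pf x => pf ++ [PySem.List.pyGetD pf (-1) 0 + x]) [0]
      = (List.range (data.length + 1)).map (fun k => (0 : Int) + (data.take k).sum) := by
    simpa using prefix_build data [] 0
  have hget : ∀ t : Int, 0 ≤ t → t ≤ (data.length : Int) →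
      PySem.List.pyGetD ((List.range (data.length + 1)).map (fun k => (0 : Int) + (data.take k).sum)) t 0
        = pvS data t := by
    intro t h0 h1
    rw [PySem.List.pyGetD_of_nonneg _ 0 h0, PySem.List.getD_map_range _ _ _ _ (by omega)]
    simp [pvS]
  simp only [hpre]
  rw [PySem.List.foldl_congr_mem _ _
      (fun acc i => acc ++ ((PySem.List.pyRange i (data.length : Int) 1).filter
          (fun j => decide (lower ≤ pvS data (j+1) - pvS data i ∧ pvS data (j+1) - pvS data i ≤ upper))).map
        (fun j => (i, j, pvS data (j+1) - pvS data i))) []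
      (fun acc i hi => ?_), PySem.List.foldl_append_eq_flatMap]
  · simp [pvBlocks]
  · have hi' := (PySem.List.mem_pyRange_one).1 hi
    rw [PySem.List.foldl_congr_mem _ _
        (fun acc j => if lower ≤ pvS data (j+1) - pvS data i ∧ pvS data (j+1) - pvS data i ≤ upper
          then acc ++ [(i, j, pvS data (j+1) - pvS data i)] else acc) acc
        (fun acc2 j hj => ?_)]
    · exact PySem.List.foldl_append_ite _ _ _ _
    · have hj' := (PySem.List.mem_pyRange_one).1 hj
      simp only [hget i hi'.1 (by omega), hget (j+1) (by omega) (by omega)]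

-- ===== VERDICT (by name: the statement is the Claim_ definition above) =====
theorem countRangeSum2_spec : Claim_equal_countRangeSum2 := by
  intro data upper lower _
  unfold Spec_countRangeSum2
  rw [B_result_eq]
  show pySorted3 _ = _
  rw [A_result_eq, pySorted3_of_pairwise _ (blocks_pairwise data upper lower)]
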